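-- pv_equiv track=rewrite | github.com/zofialuther/CS8395-08-Paper1-updated | data/translated-code/desc-to-python/prolog/Hamming-numbers.py | hamming_numbers
-- ===== SOURCE A (Python) =====
-- def hamming_numbers(N=20):
--     hamming_list = [1]
--     i, j, k = 0, 0, 0
--
--     while len(hamming_list) < N:
--         next_hamming = min(hamming_list[i]*2, hamming_list[j]*3, hamming_list[k]*5)
--         hamming_list.append(next_hamming)
--
--         if next_hamming == hamming_list[i]*2:
--             i += 1
--         if next_hamming == hamming_list[j]*3:
--             j += 1
--         if next_hamming == hamming_list[k]*5:
--             k += 1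
--
--     return hamming_list
-- ===== SOURCE B (Python) =====
-- def _first_above(lst, bound):
--     # least index idx with lst[idx] > bound (lst sorted ascending)
--     lo, hi = 0, len(lst)
--     while lo < hi:
--         mid = (lo + hi) // 2
--         if lst[mid] > bound:
--             hi = mid
--         else:
--             lo = mid + 1
--     return lo
--
-- def hamming_numbers(N=20):
--     result = [1]
--     while len(result) < N:
--         last = result[-1]
--         v = result[_first_above(result, last // 2)] * 2
--         w = result[_first_above(result, last // 3)] * 3
--         if w < v:
--             v = w
--         w = result[_first_above(result, last // 5)] * 5
--         if w < v:
--             v = w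
--         result.append(v)
--     return result
-- ===== Notes on version B (the rewrite author's own statement) =====
-- stated objective: alternative
-- what changed: B drops A's incrementally-maintained merge pointers: each step it binary-searches the sorted list, per prime factor, for the first element whose scaled product exceeds the last element, and appends the smallest of the three products.
import Mathlib
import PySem

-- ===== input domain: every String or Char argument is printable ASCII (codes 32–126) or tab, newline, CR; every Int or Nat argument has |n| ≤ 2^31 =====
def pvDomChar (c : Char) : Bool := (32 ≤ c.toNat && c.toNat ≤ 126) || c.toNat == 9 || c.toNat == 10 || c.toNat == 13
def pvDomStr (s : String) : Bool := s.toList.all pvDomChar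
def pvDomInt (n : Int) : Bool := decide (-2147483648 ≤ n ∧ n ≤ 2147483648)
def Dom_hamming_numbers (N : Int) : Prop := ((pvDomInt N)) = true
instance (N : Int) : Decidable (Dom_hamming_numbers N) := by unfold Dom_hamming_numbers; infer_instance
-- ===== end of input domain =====

-- B changes: no merge pointers; each step binary-searches, per prime factor, for the first element
-- whose scaled product exceeds the last element and appends the smallest product (alternative).

-- ===== PORT A =====
-- A's while-loop with state (hamming_list, i, j, k); indices are provably in range throughout
-- (see pvInv below), so hamming_list[i] is ported as pyGetD (the default 0 is never taken).
def hammingLoopA (N : Int) (list : List Int) (i j k : Int) : List Int :=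
  if _h : (list.length : Int) < N then
    let next := min (PySem.List.pyGetD list i 0 * 2)
                  (min (PySem.List.pyGetD list j 0 * 3) (PySem.List.pyGetD list k 0 * 5))
    let list' := list ++ [next]
    hammingLoopA N list'
      (if next = PySem.List.pyGetD list' i 0 * 2 then i + 1 else i)
      (if next = PySem.List.pyGetD list' j 0 * 3 then j + 1 else j)
      (if next = PySem.List.pyGetD list' k 0 * 5 then k + 1 else k)
  else list
termination_by (N - list.length).toNat
decreasing_by simp; omega

def hamming_numbers (N : Int) : List Int := hammingLoopA N [1] 0 0 0

-- ===== PORT B =====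
-- _first_above's while-loop; mid is provably in range (lo < hi ≤ len), so lst[mid] is pyGetD
-- with a never-taken default.
def firstAboveLoop (lst : List Int) (bound : Int) (lo hi : Int) : Int :=
  if _h : lo < hi then
    let mid := PySem.Int.floordiv (lo + hi) 2
    if bound < PySem.List.pyGetD lst mid 0 then firstAboveLoop lst bound lo mid
    else firstAboveLoop lst bound (mid + 1) hi
  else lo
termination_by (hi - lo).toNat
decreasing_by
  all_goals
    have hm := PySem.Int.floordiv_two_mid_bounds (le_of_lt _h)
    have hs : PySem.Int.floordiv (lo + hi) 2 < hi :=
      (PySem.Int.floordiv_lt_iff_lt_mul (by norm_num)).mpr (by omega)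
    omega

def first_above (lst : List Int) (bound : Int) : Int :=
  firstAboveLoop lst bound 0 (lst.length : Int)

-- B's while-loop; the looked-up indices are provably < len (last itself exceeds each bound), so
-- the result[...] lookup is pyGetD with a never-taken default.
def hammingLoopB (N : Int) (result : List Int) : List Int :=
  if _h : (result.length : Int) < N then
    let last := PySem.List.pyGetD result (-1) 0
    let v := PySem.List.pyGetD result (first_above result (PySem.Int.floordiv last 2)) 0 * 2
    let w := PySem.List.pyGetD result (first_above result (PySem.Int.floordiv last 3)) 0 * 3
    let v := if w < v then w else v
    let w := PySem.List.pyGetD result (first_above result (PySem.Int.floordiv last 5)) 0 * 5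
    let v := if w < v then w else v
    hammingLoopB N (result ++ [v])
  else result
termination_by (N - result.length).toNat
decreasing_by simp; omega

def hamming_numbers_alt (N : Int) : List Int := hammingLoopB N [1]

-- ===== PRECONDITION & SPEC =====
def Spec_hamming_numbers (N : Int) (out : List Int) : Prop := out = hamming_numbers_alt N
instance (N : Int) (out : List Int) : Decidable (Spec_hamming_numbers N out) := by unfold Spec_hamming_numbers; infer_instance

-- ===== CLAIM (what is proved, stated in full; the proofs are below) =====
def Claim_equal_hamming_numbers : Prop := ∀ (N : Int), Dom_hamming_numbers N → Spec_hamming_numbers N (hamming_numbers N)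

-- ===== LEMMAS AND PROOFS =====

-- pointer invariant: p is in range, everything strictly before p (times f) is ≤ last,
-- and l[p]*f is the first product exceeding last
def pvP (l : List Int) (last f p : Int) : Prop :=
  0 ≤ p ∧ p < (l.length : Int) ∧
  (∀ q : Int, 0 ≤ q → q < p → PySem.List.pyGetD l q 0 * f ≤ last) ∧
  last < PySem.List.pyGetD l p 0 * f

def pvInv (l : List Int) (i j k : Int) : Prop :=
  l ≠ [] ∧ l.Pairwise (· < ·) ∧ (∀ x ∈ l, 1 ≤ x) ∧
  pvP l (PySem.List.pyGetD l (-1) 0) 2 i ∧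
  pvP l (PySem.List.pyGetD l (-1) 0) 3 j ∧
  pvP l (PySem.List.pyGetD l (-1) 0) 5 k

theorem pv_sorted_lt (l : List Int) (hs : l.Pairwise (· < ·)) (q p : Int)
    (h0 : 0 ≤ q) (hqp : q < p) (hp : p < (l.length : Int)) :
    PySem.List.pyGetD l q 0 < PySem.List.pyGetD l p 0 := by
  rw [PySem.List.pyGetD_eq_getElem l 0 h0 (by omega), PySem.List.pyGetD_eq_getElem l 0 (by omega) hp]
  exact List.pairwise_iff_getElem.mp hs _ _ _ _ (by omega)

theorem pv_sorted_mono (l : List Int) (hs : l.Pairwise (· < ·)) (q p : Int)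
    (h0 : 0 ≤ q) (hqp : q ≤ p) (hp : p < (l.length : Int)) :
    PySem.List.pyGetD l q 0 ≤ PySem.List.pyGetD l p 0 := by
  rcases eq_or_lt_of_le hqp with h | h
  · rw [h]
  · exact le_of_lt (pv_sorted_lt l hs q p h0 h hp)

theorem pv_mem_le_last (l : List Int) (hs : l.Pairwise (· < ·)) (hne : l ≠ [])
    (x : Int) (hx : x ∈ l) : x ≤ PySem.List.pyGetD l (-1) 0 := by
  obtain ⟨q, hq, rfl⟩ := List.mem_iff_getElem.mp hx
  have hlen : 0 < l.length := List.length_pos_iff.mpr hne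
  have h1 : PySem.List.pyGetD l (-1) 0 = l.getLast hne := PySem.List.pyGetD_neg_one l 0 hne
  rw [h1, List.getLast_eq_getElem]
  rcases Nat.lt_or_ge q (l.length - 1) with h | h
  · exact le_of_lt (List.pairwise_iff_getElem.mp hs _ _ _ _ h)
  · have : q = l.length - 1 := by omega
    simp [this]

theorem pv_last_mem (l : List Int) (hne : l ≠ []) :
    PySem.List.pyGetD l (-1) 0 ∈ l := by
  rw [PySem.List.pyGetD_neg_one l 0 hne]
  exact List.getLast_mem hne

theorem pv_getD_append_left (l : List Int) (x : Int) (i : Int)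
    (h0 : 0 ≤ i) (hi : i < (l.length : Int)) :
    PySem.List.pyGetD (l ++ [x]) i 0 = PySem.List.pyGetD l i 0 := by
  rw [PySem.List.pyGetD_eq_getElem (l ++ [x]) 0 h0 (by simp; omega),
      PySem.List.pyGetD_eq_getElem l 0 h0 hi,
      List.getElem_append_left (by omega)]

theorem pv_getD_append_length (l : List Int) (x : Int) :
    PySem.List.pyGetD (l ++ [x]) (l.length : Int) 0 = x := by
  rw [PySem.List.pyGetD_eq_getElem (l ++ [x]) 0 (by positivity) (by simp)]
  simp

-- binary-search invariant: firstAboveLoop returns the boundary index between elements ≤ bound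
-- and elements > bound (given the window endpoints already satisfy it)
theorem firstAboveLoop_inv (l : List Int) (bound : Int) (lo hi : Int)
    (hs : l.Pairwise (· < ·)) (h0 : 0 ≤ lo) (hlh : lo ≤ hi) (hhi : hi ≤ (l.length : Int))
    (hlow : ∀ q : Int, 0 ≤ q → q < lo → PySem.List.pyGetD l q 0 ≤ bound)
    (hhigh : ∀ q : Int, hi ≤ q → q < (l.length : Int) → bound < PySem.List.pyGetD l q 0) :
    0 ≤ firstAboveLoop l bound lo hi ∧ firstAboveLoop l bound lo hi ≤ (l.length : Int) ∧
    (∀ q : Int, 0 ≤ q → q < firstAboveLoop l bound lo hi → PySem.List.pyGetD l q 0 ≤ bound) ∧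
    (∀ q : Int, firstAboveLoop l bound lo hi ≤ q → q < (l.length : Int) →
      bound < PySem.List.pyGetD l q 0) := by
  rw [firstAboveLoop]
  by_cases h : lo < hi
  · simp only [h, dif_pos]
    have hm := PySem.Int.floordiv_two_mid_bounds (le_of_lt h)
    have hlt2 : PySem.Int.floordiv (lo + hi) 2 < hi :=
      (PySem.Int.floordiv_lt_iff_lt_mul (by norm_num)).mpr (by omega)
    split_ifs with hb
    · exact firstAboveLoop_inv l bound lo (PySem.Int.floordiv (lo + hi) 2) hs h0 (by omega)
        (by omega) hlow
        (fun q hq1 hq2 => lt_of_lt_of_le hb (pv_sorted_mono l hs _ q (by omega) hq1 hq2))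
    · exact firstAboveLoop_inv l bound (PySem.Int.floordiv (lo + hi) 2 + 1) hi hs (by omega)
        (by omega) hhi
        (fun q hq0 hq1 =>
          le_trans (pv_sorted_mono l hs q _ hq0 (by omega) (by omega)) (not_lt.mp hb))
        hhigh
  · simp only [h, dif_neg, not_false_iff]
    refine ⟨h0, by omega, hlow, ?_⟩
    intro q hq1 hq2
    exact hhigh q (by omega) hq2
termination_by (hi - lo).toNat
decreasing_by all_goals omega

-- under the pointer invariant, the binary search lands exactly on A's pointer
theorem pv_bisect_eq (l : List Int) (f p : Int) (hs : l.Pairwise (· < ·))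
    (hf : 0 < f) (hP : pvP l (PySem.List.pyGetD l (-1) 0) f p) :
    PySem.List.pyGetD l
        (first_above l (PySem.Int.floordiv (PySem.List.pyGetD l (-1) 0) f)) 0
      = PySem.List.pyGetD l p 0 := by
  obtain ⟨h0, h1, hA, hB⟩ := hP
  set bound := PySem.Int.floordiv (PySem.List.pyGetD l (-1) 0) f with hbound
  obtain ⟨hr0, hr1, hrA, hrB⟩ := firstAboveLoop_inv l bound 0 (l.length : Int) hs
    (le_refl 0) (by positivity) (le_refl _) (by intro q hq1 hq2; omega)
    (by intro q hq1 hq2; omega)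
  have hbr : ∀ x : Int, x ≤ bound ↔ x * f ≤ PySem.List.pyGetD l (-1) 0 := by
    intro x
    rw [hbound]
    exact PySem.Int.le_floordiv_iff_mul_le hf
  have hrp : firstAboveLoop l bound 0 (l.length : Int) = p := by
    by_contra hne2
    rcases lt_or_gt_of_ne hne2 with hlt | hlt
    · have hgt := hrB _ (le_refl _) (by omega)
      have hle := (hbr (PySem.List.pyGetD l (firstAboveLoop l bound 0 (l.length : Int)) 0)).mpr
        (hA _ hr0 hlt)
      omega
    · have := (hbr _).mp (hrA p h0 hlt)
      omega
  unfold first_above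
  rw [hrp]

theorem pvP_step (l : List Int) (hs : l.Pairwise (· < ·))
    (f p next : Int) (hf : 2 ≤ f)
    (hP : pvP l (PySem.List.pyGetD l (-1) 0) f p)
    (hlt : PySem.List.pyGetD l (-1) 0 < next)
    (hle : next ≤ PySem.List.pyGetD l p 0 * f) (hpos : 1 ≤ next) :
    pvP (l ++ [next]) next f (if next = PySem.List.pyGetD l p 0 * f then p + 1 else p) := by
  obtain ⟨h0, h1, hA, hB⟩ := hP
  split_ifs with hc
  · refine ⟨by omega, by simp; omega, ?_, ?_⟩
    · intro q hq0 hqp1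
      rw [pv_getD_append_left l next q hq0 (by omega)]
      rcases eq_or_lt_of_le (show q ≤ p by omega) with rfl | hqp
      · rw [← hc]
      · exact le_trans (hA q hq0 hqp) (le_of_lt hlt)
    · by_cases hp1 : p + 1 < (l.length : Int)
      · rw [pv_getD_append_left l next (p + 1) (by omega) hp1]
        have hmono := pv_sorted_lt l hs p (p + 1) h0 (by omega) hp1
        calc next ≤ PySem.List.pyGetD l p 0 * f := hle
          _ < PySem.List.pyGetD l (p + 1) 0 * f := by
              exact mul_lt_mul_of_pos_right hmono (by omega)
      · have hp2 : p + 1 = (l.length : Int) := by omega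
        rw [hp2, pv_getD_append_length l next]
        nlinarith
  · refine ⟨h0, by simp; omega, ?_, ?_⟩
    · intro q hq0 hqp
      rw [pv_getD_append_left l next q hq0 (by omega)]
      exact le_trans (hA q hq0 hqp) (le_of_lt hlt)
    · rw [pv_getD_append_left l next p h0 h1]
      exact lt_of_le_of_ne hle hc

theorem pvInv_step (l : List Int) (i j k next : Int) (h : pvInv l i j k)
    (hnext : next = min (PySem.List.pyGetD l i 0 * 2)
      (min (PySem.List.pyGetD l j 0 * 3) (PySem.List.pyGetD l k 0 * 5))) :
    pvInv (l ++ [next])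
      (if next = PySem.List.pyGetD (l ++ [next]) i 0 * 2 then i + 1 else i)
      (if next = PySem.List.pyGetD (l ++ [next]) j 0 * 3 then j + 1 else j)
      (if next = PySem.List.pyGetD (l ++ [next]) k 0 * 5 then k + 1 else k) := by
  obtain ⟨hne, hs, hpos, ⟨hi0, hi1, hiA, hiB⟩, ⟨hj0, hj1, hjA, hjB⟩, ⟨hk0, hk1, hkA, hkB⟩⟩ := h
  have hlast1 : 1 ≤ PySem.List.pyGetD l (-1) 0 := hpos _ (pv_last_mem l hne)
  have hlt : PySem.List.pyGetD l (-1) 0 < next := by omega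
  have hnpos : 1 ≤ next := by omega
  rw [pv_getD_append_left l next i hi0 hi1, pv_getD_append_left l next j hj0 hj1,
      pv_getD_append_left l next k hk0 hk1]
  have hsorted' : (l ++ [next]).Pairwise (· < ·) := by
    rw [List.pairwise_append]
    refine ⟨hs, by simp, ?_⟩
    intro x hx y hy
    simp only [List.mem_singleton] at hy
    subst hy
    exact lt_of_le_of_lt (pv_mem_le_last l hs hne x hx) hlt
  refine ⟨by simp, hsorted', ?_, ?_, ?_, ?_⟩
  · intro x hx
    rcases List.mem_append.mp hx with hx | hx
    · exact hpos x hx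
    · simp only [List.mem_singleton] at hx; omega
  · rw [PySem.List.pyGetD_neg_one_append_singleton]
    exact pvP_step l hs 2 i next (by norm_num) ⟨hi0, hi1, hiA, hiB⟩ hlt (by omega) hnpos
  · rw [PySem.List.pyGetD_neg_one_append_singleton]
    exact pvP_step l hs 3 j next (by norm_num) ⟨hj0, hj1, hjA, hjB⟩ hlt (by omega) hnpos
  · rw [PySem.List.pyGetD_neg_one_append_singleton]
    exact pvP_step l hs 5 k next (by norm_num) ⟨hk0, hk1, hkA, hkB⟩ hlt (by omega) hnpos

theorem pv_loop_eq (N : Int) (l : List Int) (i j k : Int) (h : pvInv l i j k) :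
    hammingLoopA N l i j k = hammingLoopB N l := by
  rw [hammingLoopA, hammingLoopB]
  by_cases hlen : (l.length : Int) < N
  · simp only [hlen, dif_pos]
    obtain ⟨hne, hs, hpos, hPi, hPj, hPk⟩ := id h
    rw [pv_bisect_eq l 2 i hs (by norm_num) hPi, pv_bisect_eq l 3 j hs (by norm_num) hPj,
        pv_bisect_eq l 5 k hs (by norm_num) hPk]
    have hmin : (if PySem.List.pyGetD l k 0 * 5 < if PySem.List.pyGetD l j 0 * 3 < PySem.List.pyGetD l i 0 * 2 then PySem.List.pyGetD l j 0 * 3 else PySem.List.pyGetD l i 0 * 2 then PySem.List.pyGetD l k 0 * 5 else if PySem.List.pyGetD l j 0 * 3 < PySem.List.pyGetD l i 0 * 2 then PySem.List.pyGetD l j 0 * 3 else PySem.List.pyGetD l i 0 * 2)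
        = min (PySem.List.pyGetD l i 0 * 2) (min (PySem.List.pyGetD l j 0 * 3) (PySem.List.pyGetD l k 0 * 5)) := by
      split_ifs <;> omega
    rw [hmin]
    exact pv_loop_eq N _ _ _ _ (pvInv_step l i j k _ h rfl)
  · simp only [hlen, dif_neg, not_false_iff]
termination_by (N - l.length).toNat
decreasing_by simp; omega

-- ===== VERDICT (by name: the statement is the Claim_ definition above) =====
theorem hamming_numbers_spec : Claim_equal_hamming_numbers := by
  intro N _
  show _ = _
  unfold hamming_numbers hamming_numbers_alt
  apply pv_loop_eq
  constructor
  · simp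
  constructor
  · simp
  constructor
  · intro x hx; simp at hx; omega
  refine ⟨⟨by norm_num, by norm_num, ?_, by decide⟩,
          ⟨by norm_num, by norm_num, ?_, by decide⟩,
          ⟨by norm_num, by norm_num, ?_, by decide⟩⟩ <;>
    (intro q h0 h1; omega)
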